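-- pv_equiv track=rewrite | github.com/DVampire/LeetCodePro | 3757.number-of-effective-subsequences.py | countEffective
-- ===== SOURCE A (Python) =====
-- from typing import List
--
-- def countEffective(nums: List[int]) -> int:
--     MOD = 10**9 + 7
--     T = 0
--     for x in nums:
--         T |= x
--
--     if T == 0:
--         return 0
--
--     # Map the set bits of T to a continuous range [0, m-1]
--     bits = [i for i in range(21) if (T >> i) & 1]
--     m = len(bits)
--     mapping = {bit: i for i, bit in enumerate(bits)}
--
--     # Count frequencies of mapped numbers
--     cnt = [0] * (1 << m)
--     for x in nums:
--         nx = 0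
--         for i in range(m):
--             if (x >> bits[i]) & 1:
--                 nx |= (1 << i)
--         cnt[nx] += 1
--
--     # SOS DP (Zeta Transform) to calculate f(mask)
--     # f(mask) = number of elements whose mapped value is a subset of mask
--     for i in range(m):
--         bit = 1 << i
--         for mask in range(1 << m):
--             if mask & bit:
--                 cnt[mask] += cnt[mask ^ bit]
--
--     # Precompute powers of 2
--     pow2 = [1] * (len(nums) + 1)
--     for i in range(1, len(nums) + 1):
--         pow2[i] = (pow2[i-1] * 2) % MOD
--
--     # Number of subsets B such that OR(B) = T
--     # Using PIE: Count(OR(B) = T) = sum_{mask subseteq T} (-1)^(m - popcount(mask)) * 2^f(mask)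
--     subset_count_T = 0
--     for mask in range(1 << m):
--         popcount = bin(mask).count('1')
--         term = pow2[cnt[mask]]
--         if (m - popcount) % 2 == 1:
--             subset_count_T = (subset_count_T - term) % MOD
--         else:
--             subset_count_T = (subset_count_T + term) % MOD
--
--     # Total subsets is 2^n. Effective are those where OR(B) < T.
--     # ans = 2^n - subset_count_T
--     total_subsets = pow2[len(nums)]
--     ans = (total_subsets - subset_count_T) % MOD
--
--     return ans
-- ===== SOURCE B (Python) =====
-- def countEffective(nums):
--     MOD = 10**9 + 7
--     T = 0
--     for x in nums:
--         T |= x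
--     if T == 0:
--         return 0
--     bits = [i for i in range(21) if (T >> i) & 1]
--     m = len(bits)
--     # compress each element onto T's low set bits once, up front
--     masks = [sum((1 << i) for i in range(m) if (x >> bits[i]) & 1) for x in nums]
--     # inclusion-exclusion directly over the 2^m masks, counting subsets on the fly
--     ans = pow(2, len(nums), MOD)
--     for mask in range(1 << m):
--         f = sum(1 for mx in masks if mx | mask == mask)
--         term = pow(2, f, MOD)
--         if (m - bin(mask).count("1")) % 2 == 1:
--             ans = (ans + term) % MOD
--         else:
--             ans = (ans - term) % MOD
--     return ans
-- ===== Notes on version B (the rewrite author's own statement) =====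
-- stated objective: simpler
-- what changed: B drops A's frequency array, in-place subset-sum (SOS/zeta) transform and precomputed power table, and instead does a single inclusion-exclusion pass that counts the matching elements directly for each mask with pow(2, f, MOD), folding the final subtraction from 2^n into the running answer.
import Mathlib
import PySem

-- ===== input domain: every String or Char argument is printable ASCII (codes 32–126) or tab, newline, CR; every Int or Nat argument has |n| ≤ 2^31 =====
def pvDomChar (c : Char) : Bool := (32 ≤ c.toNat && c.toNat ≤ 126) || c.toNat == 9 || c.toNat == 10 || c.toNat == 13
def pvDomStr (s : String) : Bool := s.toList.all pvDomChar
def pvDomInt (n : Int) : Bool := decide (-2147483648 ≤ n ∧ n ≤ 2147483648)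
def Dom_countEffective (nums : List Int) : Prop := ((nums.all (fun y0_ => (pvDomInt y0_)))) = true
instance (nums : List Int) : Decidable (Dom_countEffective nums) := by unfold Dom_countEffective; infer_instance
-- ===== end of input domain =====

-- B replaces A's frequency array + subset-sum (SOS/zeta) DP and precomputed power table by a single
-- inclusion–exclusion pass that counts the matching elements directly per mask (objective: simpler, not faster).

-- ===== PORT A =====
-- shared bit-test helper: Python's truthiness test `if (x >> b) & 1:` (exact, incl. negative x)
def pyTestBit (x : Int) (b : Nat) : Bool := PySem.Int.band (x >>> b) 1 != 0

def countEffective (nums : List Int) : Int :=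
  let MOD : Int := 1000000007
  let T : Int := nums.foldl (fun t x => PySem.Int.bor t x) 0
  if T = 0 then 0
  else
    -- bits = [i for i in range(21) if (T >> i) & 1]  (range of nonnegative literals ported as List.range)
    let bits : List Nat := (List.range 21).filter (fun i => pyTestBit T i)
    let m : Nat := bits.length
    -- the Python also builds `mapping`, which it never uses; omitted (pure, no effect)
    let cnt : Array Int := Array.replicate (1 <<< m) 0
    -- frequency loop; bits[i] with i < m = len(bits) is in range, so getD is exact;
    -- nx < 2^m = len(cnt) always (nx only collects bits below m), so setIfInBounds always sets
    let cnt : Array Int := nums.foldl (fun c x =>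
      let nx : Nat := (List.range m).foldl (fun nx i =>
        if pyTestBit x (bits.getD i 0) then nx ||| (1 <<< i) else nx) 0
      c.setIfInBounds nx (c.getD nx 0 + 1)) cnt
    -- SOS / zeta transform; all indices mask, mask ^^^ bit are < 2^m = len(cnt)
    let cnt : Array Int := (List.range m).foldl (fun c i =>
      let bit : Nat := 1 <<< i
      (List.range (1 <<< m)).foldl (fun c mask =>
        if mask &&& bit ≠ 0 then c.setIfInBounds mask (c.getD mask 0 + c.getD (mask ^^^ bit) 0) else c) c) cnt
    -- pow2 table; Python's `% MOD` with MOD > 0 is Int emod, exact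
    let pow2 : Array Int := Array.replicate (nums.length + 1) 1
    let pow2 : Array Int := (List.range' 1 nums.length).foldl (fun p i =>
      p.setIfInBounds i (p.getD (i - 1) 0 * 2 % MOD)) pow2
    -- PIE sum; bin(mask).count('1') on mask ≥ 0 is PySem.Int.bitCount; cnt[mask] is a
    -- nonnegative count ≤ len(nums), so .toNat is exact and pow2[cnt[mask]] is in range
    let sc : Int := (List.range (1 <<< m)).foldl (fun s mask =>
      let popcount : Nat := PySem.Int.bitCount (Int.ofNat mask)
      let term : Int := pow2.getD (cnt.getD mask 0).toNat 0
      if ((m : Int) - (popcount : Int)) % 2 = 1 then (s - term) % MOD else (s + term) % MOD) 0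
    (pow2.getD nums.length 0 - sc) % MOD

-- ===== PORT B =====
-- B's compress(x): sum((1 << i) for i in range(m) if (x >> bits[i]) & 1)
def gMask (bits : List Nat) (m : Nat) (x : Int) : Nat :=
  (((List.range m).filter (fun i => pyTestBit x (bits.getD i 0))).map (fun i => 1 <<< i)).sum

def countEffective_alt (nums : List Int) : Int :=
  let MOD : Int := 1000000007
  let T : Int := nums.foldl (fun t x => PySem.Int.bor t x) 0
  if T = 0 then 0
  else
    let bits : List Nat := (List.range 21).filter (fun i => pyTestBit T i)
    let m : Nat := bits.length
    let masks : List Nat := nums.map (fun x => gMask bits m x)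
    -- pow(2, e, MOD) is PySem.Int.powMod; sum(1 for mx in masks if …) is countP
    (List.range (1 <<< m)).foldl (fun ans mask =>
      let f : Nat := masks.countP (fun mx => mx ||| mask == mask)
      let term : Int := PySem.Int.powMod 2 f MOD
      if ((m : Int) - (PySem.Int.bitCount (Int.ofNat mask) : Int)) % 2 = 1 then (ans + term) % MOD
      else (ans - term) % MOD) (PySem.Int.powMod 2 nums.length MOD)

-- ===== PRECONDITION & SPEC =====
def Spec_countEffective (nums : List Int) (out : Int) : Prop := out = countEffective_alt nums
instance (nums : List Int) (out : Int) : Decidable (Spec_countEffective nums out) := by unfold Spec_countEffective; infer_instance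

-- ===== CLAIM (what is proved, stated in full; the proofs are below) =====
def Claim_equal_countEffective : Prop := ∀ (nums : List Int), Dom_countEffective nums → Spec_countEffective nums (countEffective nums)

-- ===== LEMMAS AND PROOFS =====

lemma or_two_pow_of_lt (a m : Nat) (h : a < 2 ^ m) : a ||| 2 ^ m = a + 2 ^ m := by
  apply Nat.eq_of_testBit_eq
  intro j
  rcases lt_trichotomy j m with hj | rfl | hj
  · rw [Nat.add_comm, Nat.testBit_two_pow_add_gt hj, Nat.testBit_lor, Nat.testBit_two_pow]
    simp [Nat.ne_of_gt hj]
  · rw [Nat.add_comm, Nat.testBit_two_pow_add_eq, Nat.testBit_lor, Nat.testBit_two_pow,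
      Nat.testBit_lt_two_pow h]
    simp
  · have h1 : a.testBit j = false := Nat.testBit_lt_two_pow (lt_of_lt_of_le h (Nat.pow_le_pow_right (by norm_num) hj.le))
    have h2 : (a + 2 ^ m).testBit j = false := by
      apply Nat.testBit_lt_two_pow
      calc a + 2 ^ m < 2 ^ m + 2 ^ m := by omega
      _ = 2 ^ (m + 1) := by ring
      _ ≤ 2 ^ j := Nat.pow_le_pow_right (by norm_num) hj
    rw [h2, Nat.testBit_lor, h1, Nat.testBit_two_pow]
    simp [Nat.ne_of_lt hj]
lemma sum_filter_pow_lt (p : Nat → Bool) (m : Nat) :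
    (((List.range m).filter p).map (fun i => 1 <<< i)).sum < 2 ^ m := by
  simp only [Nat.one_shiftLeft]
  induction m with
  | zero => simp
  | succ m ih =>
    rw [List.range_succ, List.filter_append]
    by_cases hp : p m = true <;>
      simp [hp, List.map_append, Nat.pow_succ] <;> omega
lemma compress_fold_eq (p : Nat → Bool) (m : Nat) :
    (List.range m).foldl (fun nx i => if p i then nx ||| (1 <<< i) else nx) 0
      = (((List.range m).filter p).map (fun i => 1 <<< i)).sum := by
  induction m with
  | zero => simp
  | succ m ih =>
    rw [List.range_succ, List.foldl_append, List.filter_append, ih]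
    by_cases hp : p m = true <;>
      simp only [List.foldl_cons, List.foldl_nil, hp, if_true, if_false, Bool.false_eq_true,
        List.filter_cons, List.filter_nil, List.map_append, List.map_cons, List.map_nil, List.sum_append]
    · rw [Nat.one_shiftLeft, or_two_pow_of_lt _ _ (sum_filter_pow_lt p m)]; simp
    · simp

lemma aGetD_set (a : Array Int) (i j : Nat) (v : Int) :
    (a.setIfInBounds i v).getD j 0 = if i = j ∧ i < a.size then v else a.getD j 0 := by
  rw [Array.getD_eq_getD_getElem?, Array.getD_eq_getD_getElem?, Array.getElem?_setIfInBounds]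
  by_cases hij : i = j
  · subst hij
    by_cases hi : i < a.size
    · simp [hi]
    · simp [hi]
  · simp [hij]
lemma freq_loop (g : Int → Nat) (N : Nat) (hg : ∀ x, g x < N) :
    ∀ (xs : List Int) (c : Array Int), c.size = N →
      (xs.foldl (fun c x => c.setIfInBounds (g x) (c.getD (g x) 0 + 1)) c).size = N ∧
      ∀ v, (xs.foldl (fun c x => c.setIfInBounds (g x) (c.getD (g x) 0 + 1)) c).getD v 0
        = c.getD v 0 + (xs.countP (fun x => g x == v) : Int) := by
  intro xs
  induction xs with
  | nil => intro c hc; simp [hc]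
  | cons x xs ih =>
    intro c hc
    obtain ⟨hs, hv⟩ := ih (c.setIfInBounds (g x) (c.getD (g x) 0 + 1)) (by simp [hc])
    refine ⟨hs, fun v => ?_⟩
    rw [List.foldl_cons, hv v, aGetD_set]
    by_cases hgx : g x = v
    · simp only [hgx, hc, List.countP_cons]
      have : v < N := hgx ▸ hg x
      simp [this]
      ring
    · simp [hgx]
lemma land_two_pow_ne_zero_iff (x i : Nat) : x &&& (1 <<< i) ≠ 0 ↔ x.testBit i = true := by
  rw [Nat.one_shiftLeft]
  constructor
  · intro h
    by_contra hb
    apply h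
    apply Nat.zero_of_testBit_eq_false
    intro j
    rw [Nat.testBit_land, Nat.testBit_two_pow]
    rcases eq_or_ne i j with rfl | hj
    · simp [Bool.not_eq_true] at hb
      simp [hb]

    · simp [hj]
  · intro h h0
    have := congrArg (fun n => n.testBit i) h0
    simp [h] at this
lemma or_eq_iff_subset (v mask : Nat) :
    v ||| mask = mask ↔ ∀ j, v.testBit j = true → mask.testBit j = true := by
  constructor
  · intro h j hj
    have := congrArg (fun n => n.testBit j) h
    simpa [Nat.testBit_lor, hj] using this
  · intro h
    apply Nat.eq_of_testBit_eq
    intro j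
    rw [Nat.testBit_lor]
    cases hv : v.testBit j
    · simp
    · simp [h j hv]
lemma shiftRight_eq_iff (v mask i : Nat) :
    v >>> i = mask >>> i ↔ ∀ j, i ≤ j → v.testBit j = mask.testBit j := by
  constructor
  · intro h j hij
    have := congrArg (fun n => n.testBit (j - i)) h
    simpa [Nat.testBit_shiftRight, Nat.add_sub_cancel' hij] using this
  · intro h
    apply Nat.eq_of_testBit_eq
    intro j
    rw [Nat.testBit_shiftRight, Nat.testBit_shiftRight]
    exact h (i + j) (Nat.le_add_right i j)
lemma countP_or_disj {α : Type} (l : List α) (p q : α → Bool) (h : ∀ a ∈ l, ¬(p a = true ∧ q a = true)) :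
    l.countP (fun a => p a || q a) = l.countP p + l.countP q := by
  induction l with
  | nil => simp
  | cons a l ih =>
    rw [List.countP_cons, List.countP_cons, List.countP_cons,
      ih (fun b hb => h b (List.mem_cons_of_mem a hb))]
    have := h a (List.mem_cons_self ..)
    cases hp : p a <;> cases hq : q a <;> simp [hp, hq] at this ⊢ <;> omega

lemma xor_pow_testBit (mask i j : Nat) :
    (mask ^^^ (1 <<< i)).testBit j = ((mask.testBit j).xor (decide (i = j))) := by
  rw [Nat.one_shiftLeft, Nat.testBit_xor, Nat.testBit_two_pow]

lemma step_bit_false (v mask i : Nat) (hm : mask.testBit i = false) :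
    ((v ||| mask = mask) ∧ v >>> (i+1) = mask >>> (i+1)) ↔
      ((v ||| mask = mask) ∧ v >>> i = mask >>> i) := by
  constructor
  · rintro ⟨hsub, hsh⟩
    refine ⟨hsub, (shiftRight_eq_iff _ _ _).mpr fun j hij => ?_⟩
    rcases Nat.eq_or_lt_of_le hij with rfl | hij'
    · cases hv : v.testBit i
      · rw [hm]
      · exact absurd ((or_eq_iff_subset v mask).mp hsub i hv) (by simp [hm])
    · exact (shiftRight_eq_iff _ _ _).mp hsh j hij'
  · rintro ⟨hsub, hsh⟩
    exact ⟨hsub, (shiftRight_eq_iff _ _ _).mpr fun j hij =>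
      (shiftRight_eq_iff _ _ _).mp hsh j (by omega)⟩

lemma step_bit_true (v mask i : Nat) (hm : mask.testBit i = true) :
    ((v ||| mask = mask) ∧ v >>> (i+1) = mask >>> (i+1)) ↔
      (((v ||| mask = mask) ∧ v >>> i = mask >>> i) ∨
       ((v ||| (mask ^^^ (1 <<< i)) = mask ^^^ (1 <<< i)) ∧ v >>> i = (mask ^^^ (1 <<< i)) >>> i)) := by
  constructor
  · rintro ⟨hsub, hsh⟩
    cases hv : v.testBit i
    · right
      constructor
      · rw [or_eq_iff_subset]
        intro j hj
        rw [xor_pow_testBit]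
        have hji : i ≠ j := by rintro rfl; rw [hv] at hj; exact Bool.false_ne_true hj
        simp [hji, (or_eq_iff_subset v mask).mp hsub j hj]
      · rw [shiftRight_eq_iff]
        intro j hij
        rcases Nat.eq_or_lt_of_le hij with rfl | hij'
        · rw [xor_pow_testBit]; simp [hv, hm]
        · rw [xor_pow_testBit]
          have hji : i ≠ j := by omega
          simp [hji, (shiftRight_eq_iff _ _ _).mp hsh j hij']
    · left
      refine ⟨hsub, (shiftRight_eq_iff _ _ _).mpr fun j hij => ?_⟩
      rcases Nat.eq_or_lt_of_le hij with rfl | hij'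
      · rw [hv, hm]
      · exact (shiftRight_eq_iff _ _ _).mp hsh j hij'
  · rintro (⟨hsub, hsh⟩ | ⟨hsub, hsh⟩)
    · exact ⟨hsub, (shiftRight_eq_iff _ _ _).mpr fun j hij =>
        (shiftRight_eq_iff _ _ _).mp hsh j (by omega)⟩
    · constructor
      · rw [or_eq_iff_subset]
        intro j hj
        have h' := (or_eq_iff_subset _ _).mp hsub j hj
        rw [xor_pow_testBit] at h'
        rcases eq_or_ne i j with rfl | hji
        · exact hm
        · simpa [hji] using h'
      · rw [shiftRight_eq_iff]
        intro j hij
        have h' := (shiftRight_eq_iff _ _ _).mp hsh j (by omega)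
        rw [xor_pow_testBit] at h'
        have hji : i ≠ j := by omega
        simpa [hji] using h'

lemma step_bit_disj (v mask i : Nat) (hm : mask.testBit i = true) :
    ¬(((v ||| mask = mask) ∧ v >>> i = mask >>> i) ∧
      ((v ||| (mask ^^^ (1 <<< i)) = mask ^^^ (1 <<< i)) ∧ v >>> i = (mask ^^^ (1 <<< i)) >>> i)) := by
  rintro ⟨⟨_, h1⟩, ⟨_, h2⟩⟩
  have e1 := (shiftRight_eq_iff _ _ _).mp h1 i le_rfl
  have e2 := (shiftRight_eq_iff _ _ _).mp h2 i le_rfl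
  rw [xor_pow_testBit] at e2
  simp [hm] at e1 e2
  rw [e1] at e2
  exact (Bool.true_eq_false ..).mp e2

lemma zeta_pass_aux (N i : Nat) (c : Array Int) (hc : c.size = N) :
    ∀ k ≤ N,
    ((List.range k).foldl (fun c mask =>
        if mask &&& (1 <<< i) ≠ 0 then c.setIfInBounds mask (c.getD mask 0 + c.getD (mask ^^^ (1 <<< i)) 0) else c) c).size = N ∧
    ∀ mask, ((List.range k).foldl (fun c mask =>
        if mask &&& (1 <<< i) ≠ 0 then c.setIfInBounds mask (c.getD mask 0 + c.getD (mask ^^^ (1 <<< i)) 0) else c) c).getD mask 0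
      = c.getD mask 0 + (if mask < k ∧ mask &&& (1 <<< i) ≠ 0 then c.getD (mask ^^^ (1 <<< i)) 0 else 0) := by
  intro k
  induction k with
  | zero => intro _; simp [hc]
  | succ k ih =>
    intro hk
    obtain ⟨hs, hv⟩ := ih (by omega)
    rw [List.range_succ, List.foldl_append]
    set s := (List.range k).foldl (fun c mask =>
        if mask &&& (1 <<< i) ≠ 0 then c.setIfInBounds mask (c.getD mask 0 + c.getD (mask ^^^ (1 <<< i)) 0) else c) c with hsdef
    simp only [List.foldl_cons, List.foldl_nil]
    by_cases hb : k &&& (1 <<< i) ≠ 0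
    · have hxb : ¬((k ^^^ (1 <<< i)) &&& (1 <<< i) ≠ 0) := by
        rw [land_two_pow_ne_zero_iff] at hb ⊢
        simp [Nat.testBit_xor, Nat.one_shiftLeft, hb]
      have hr1 : s.getD k 0 = c.getD k 0 := by rw [hv k]; simp
      have hr2 : s.getD (k ^^^ (1 <<< i)) 0 = c.getD (k ^^^ (1 <<< i)) 0 := by
        rw [hv, if_neg (fun hcon => hxb hcon.2)]; ring
      rw [if_pos hb]
      refine ⟨by simp [hs], fun mask => ?_⟩
      rw [aGetD_set, hs, hr1, hr2]
      by_cases hmk : k = mask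
      · subst hmk
        rw [if_pos ⟨rfl, by omega⟩, if_pos ⟨by omega, hb⟩]
      · have hiff : (mask < k + 1 ∧ mask &&& (1 <<< i) ≠ 0) ↔ (mask < k ∧ mask &&& (1 <<< i) ≠ 0) := by
          constructor
          · rintro ⟨h1, h2⟩; exact ⟨by omega, h2⟩
          · rintro ⟨h1, h2⟩; exact ⟨by omega, h2⟩
        rw [if_neg (fun hcon => hmk hcon.1), hv mask]
        simp only [hiff]
    · have hiff : ∀ mask, (mask < k + 1 ∧ mask &&& (1 <<< i) ≠ 0) ↔ (mask < k ∧ mask &&& (1 <<< i) ≠ 0) := by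
        intro mask
        constructor
        · rintro ⟨h1, h2⟩
          have : mask ≠ k := by intro h; exact hb (h ▸ h2)
          exact ⟨by omega, h2⟩
        · rintro ⟨h1, h2⟩; exact ⟨by omega, h2⟩
      rw [if_neg hb]
      refine ⟨hs, fun mask => ?_⟩
      rw [hv mask]
      simp only [hiff]

lemma zeta_outer (g : Int → Nat) (m : Nat) (nums : List Int)
    (c : Array Int) (hc : c.size = 1 <<< m)
    (hbase : ∀ v, v < 1 <<< m → c.getD v 0 = (nums.countP (fun x => g x == v) : Int)) :
    ∀ i ≤ m,
      ((List.range i).foldl (fun c i =>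
        (List.range (1 <<< m)).foldl (fun c mask =>
          if mask &&& (1 <<< i) ≠ 0 then c.setIfInBounds mask (c.getD mask 0 + c.getD (mask ^^^ (1 <<< i)) 0) else c) c) c).size = 1 <<< m ∧
      ∀ mask, mask < 1 <<< m →
      ((List.range i).foldl (fun c i =>
        (List.range (1 <<< m)).foldl (fun c mask =>
          if mask &&& (1 <<< i) ≠ 0 then c.setIfInBounds mask (c.getD mask 0 + c.getD (mask ^^^ (1 <<< i)) 0) else c) c) c).getD mask 0
        = (nums.countP (fun x => (g x ||| mask == mask) && (g x >>> i == mask >>> i)) : Int) := by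
  intro i
  induction i with
  | zero =>
    intro _
    refine ⟨by simpa using hc, fun mask hmask => ?_⟩
    simp only [List.range_zero, List.foldl_nil]
    rw [hbase mask hmask]
    congr 1
    apply List.countP_congr
    intro x _
    by_cases h : g x = mask <;> simp [h, Nat.shiftRight_zero, Nat.or_self]
  | succ i ih =>
    intro hi
    obtain ⟨hs, hv⟩ := ih (by omega)
    rw [List.range_succ, List.foldl_append]
    simp only [List.foldl_cons, List.foldl_nil]
    set s := (List.range i).foldl (fun c i =>
        (List.range (1 <<< m)).foldl (fun c mask =>
          if mask &&& (1 <<< i) ≠ 0 then c.setIfInBounds mask (c.getD mask 0 + c.getD (mask ^^^ (1 <<< i)) 0) else c) c) c with hsdef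
    obtain ⟨hps, hpv⟩ := zeta_pass_aux (1 <<< m) i s hs (1 <<< m) le_rfl
    refine ⟨hps, fun mask hmask => ?_⟩
    rw [hpv mask]
    have him : i < m := by omega
    have hxlt : mask ^^^ (1 <<< i) < 1 <<< m := by
      simp only [Nat.one_shiftLeft] at hmask ⊢
      exact Nat.xor_lt_two_pow hmask (Nat.pow_lt_pow_right (by norm_num) him)
    cases hmb : mask.testBit i
    · have hcond : ¬(mask < 1 <<< m ∧ mask &&& (1 <<< i) ≠ 0) := by
        rintro ⟨_, hb⟩
        rw [land_two_pow_ne_zero_iff] at hb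
        rw [hmb] at hb
        exact Bool.false_ne_true hb
      rw [if_neg hcond, hv mask hmask]
      simp only [add_zero]
      congr 1
      apply List.countP_congr
      intro x _
      rw [Bool.eq_iff_iff]
      simp only [Bool.and_eq_true, beq_iff_eq, iff_true]
      exact (step_bit_false (g x) mask i hmb).symm
    · have hcond : mask < 1 <<< m ∧ mask &&& (1 <<< i) ≠ 0 :=
        ⟨hmask, (land_two_pow_ne_zero_iff mask i).mpr hmb⟩
      rw [if_pos hcond, hv mask hmask, hv _ hxlt]
      have hsplit : nums.countP (fun x => (g x ||| mask == mask) && (g x >>> (i+1) == mask >>> (i+1)))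
          = nums.countP (fun x =>
              ((g x ||| mask == mask) && (g x >>> i == mask >>> i)) ||
              ((g x ||| (mask ^^^ (1 <<< i)) == mask ^^^ (1 <<< i)) && (g x >>> i == (mask ^^^ (1 <<< i)) >>> i))) := by
        apply List.countP_congr
        intro x _
        rw [Bool.eq_iff_iff]
        simp only [Bool.and_eq_true, Bool.or_eq_true, beq_iff_eq, iff_true]
        exact step_bit_true (g x) mask i hmb
      rw [hsplit, countP_or_disj _ _ _ (fun x _ => by
        simp only [Bool.and_eq_true, beq_iff_eq]
        exact step_bit_disj (g x) mask i hmb)]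
      push_cast
      ring

lemma pow2_aux (n : Nat) : ∀ k ≤ n,
    ((List.range' 1 k).foldl (fun p i =>
        p.setIfInBounds i (p.getD (i - 1) 0 * 2 % (1000000007 : Int))) (Array.replicate (n + 1) 1)).size = n + 1 ∧
    ∀ j ≤ n, ((List.range' 1 k).foldl (fun p i =>
        p.setIfInBounds i (p.getD (i - 1) 0 * 2 % (1000000007 : Int))) (Array.replicate (n + 1) 1)).getD j 0
      = if j ≤ k then (2 : Int) ^ j % 1000000007 else 1 := by
  intro k
  induction k with
  | zero =>
    intro _
    refine ⟨by simp, fun j hj => ?_⟩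
    simp only [List.range'_zero, List.foldl_nil]
    rw [Array.getD_eq_getD_getElem?, Array.getElem?_replicate, if_pos (by omega)]
    rcases Nat.eq_zero_or_pos j with rfl | hjp
    · norm_num
    · rw [if_neg (by omega)]; rfl
  | succ k ih =>
    intro hk
    obtain ⟨hs, hv⟩ := ih (by omega)
    rw [List.range'_concat, List.foldl_append]
    simp only [List.foldl_cons, List.foldl_nil, one_mul]
    set s := (List.range' 1 k).foldl (fun p i =>
        p.setIfInBounds i (p.getD (i - 1) 0 * 2 % (1000000007 : Int))) (Array.replicate (n + 1) 1) with hsdef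
    refine ⟨by simp [hs], fun j hj => ?_⟩
    rw [aGetD_set, hs]
    have hread : s.getD (1 + k - 1) 0 = (2 : Int) ^ k % 1000000007 := by
      have : 1 + k - 1 = k := by omega
      rw [this, hv k (by omega), if_pos le_rfl]
    by_cases hjk : 1 + k = j
    · rw [if_pos ⟨hjk, by omega⟩, hread, if_pos (by omega)]
      have hkj : j = k + 1 := by omega
      subst hkj
      rw [Int.mul_emod, Int.emod_emod_of_dvd _ (dvd_refl _)]
      norm_num [pow_succ, Int.mul_emod]
    · rw [if_neg (by intro hcon; exact hjk hcon.1), hv j hj]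
      by_cases h1 : j ≤ k
      · rw [if_pos h1, if_pos (by omega)]
      · rw [if_neg h1, if_neg (by omega)]

lemma pie_fold (L : List Nat) (c : Nat → Prop) [DecidablePred c] (tA tB : Nat → Int) (P M : Int)
    (ht : ∀ mask ∈ L, tA mask = tB mask) :
    ∀ (s b : Int), b = (P - s) % M →
      L.foldl (fun ans mask => if c mask then (ans + tB mask) % M else (ans - tB mask) % M) b
        = (P - L.foldl (fun s mask => if c mask then (s - tA mask) % M else (s + tA mask) % M) s) % M := by
  induction L with
  | nil => intro s b hb; simpa using hb
  | cons mask L ih =>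
    intro s b hb
    simp only [List.foldl_cons]
    have htm := ht mask (List.mem_cons_self ..)
    have ht' : ∀ m ∈ L, tA m = tB m := fun m hm => ht m (List.mem_cons_of_mem _ hm)
    by_cases hcm : c mask
    · rw [if_pos hcm, if_pos hcm]
      apply ih ht'
      rw [hb, ← htm, Int.emod_add_emod, Int.sub_emod_emod]
      congr 1
      ring
    · rw [if_neg hcm, if_neg hcm]
      apply ih ht'
      rw [hb, ← htm, Int.emod_sub_emod, Int.sub_emod_emod]
      congr 1
      ring

lemma pow2_val (n j : Nat) (hj : j ≤ n) :
    ((List.range' 1 n).foldl (fun (p : Array Int) i =>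
        p.setIfInBounds i (p.getD (i - 1) 0 * 2 % (1000000007 : Int))) (Array.replicate (n + 1) (1 : Int))).getD j 0
      = (2 : Int) ^ j % 1000000007 := by
  have h := (pow2_aux n n le_rfl).2 j hj
  rwa [if_pos hj] at h

-- the whole A-side count pipeline (frequency array + zeta transform), characterised:
-- entry `mask` of the transformed array counts the elements whose compressed mask is a submask of `mask`
lemma cnt_final (bits : List Nat) (nums : List Int) :
    ∀ mask, mask < 1 <<< bits.length →
    ((List.range bits.length).foldl (fun (c : Array Int) i =>
        (List.range (1 <<< bits.length)).foldl (fun (c : Array Int) mask =>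
          if mask &&& (1 <<< i) ≠ 0 then c.setIfInBounds mask (c.getD mask 0 + c.getD (mask ^^^ (1 <<< i)) 0) else c) c)
      (nums.foldl (fun (c : Array Int) x =>
        c.setIfInBounds ((List.range bits.length).foldl (fun nx i =>
            if pyTestBit x (bits.getD i 0) then nx ||| (1 <<< i) else nx) 0)
          (c.getD ((List.range bits.length).foldl (fun nx i =>
            if pyTestBit x (bits.getD i 0) then nx ||| (1 <<< i) else nx) 0) 0 + 1))
        (Array.replicate (1 <<< bits.length) (0 : Int)))).getD mask 0
    = (nums.countP (fun x => gMask bits bits.length x ||| mask == mask) : Int) := by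
  intro mask hmask
  have hgag : ∀ x : Int, (List.range bits.length).foldl (fun nx i =>
      if pyTestBit x (bits.getD i 0) then nx ||| (1 <<< i) else nx) 0 = gMask bits bits.length x :=
    fun x => compress_fold_eq _ _
  have hglt : ∀ x : Int, (List.range bits.length).foldl (fun nx i =>
      if pyTestBit x (bits.getD i 0) then nx ||| (1 <<< i) else nx) 0 < 1 <<< bits.length := by
    intro x
    rw [hgag x, Nat.one_shiftLeft]
    exact sum_filter_pow_lt _ _
  obtain ⟨hfs, hfv⟩ := freq_loop _ (1 <<< bits.length) hglt nums
    (Array.replicate (1 <<< bits.length) (0 : Int)) (by simp)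
  have hbase : ∀ v, v < 1 <<< bits.length →
      (nums.foldl (fun (c : Array Int) x =>
        c.setIfInBounds ((List.range bits.length).foldl (fun nx i =>
            if pyTestBit x (bits.getD i 0) then nx ||| (1 <<< i) else nx) 0)
          (c.getD ((List.range bits.length).foldl (fun nx i =>
            if pyTestBit x (bits.getD i 0) then nx ||| (1 <<< i) else nx) 0) 0 + 1))
        (Array.replicate (1 <<< bits.length) (0 : Int))).getD v 0
      = (nums.countP (fun x => ((List.range bits.length).foldl (fun nx i =>
            if pyTestBit x (bits.getD i 0) then nx ||| (1 <<< i) else nx) 0) == v) : Int) := by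
    intro v _
    rw [hfv v, Array.getD_eq_getD_getElem?, Array.getElem?_replicate]
    by_cases hv : v < 1 <<< bits.length <;> simp [hv]
  have hz := (zeta_outer _ bits.length nums _ hfs hbase bits.length le_rfl).2 mask hmask
  rw [hz]
  congr 1
  apply List.countP_congr
  intro x _
  rw [Bool.eq_iff_iff]
  simp only [Bool.and_eq_true, beq_iff_eq, hgag x]
  have h0 : gMask bits bits.length x >>> bits.length = 0 := by
    rw [Nat.shiftRight_eq_div_pow]
    apply Nat.div_eq_of_lt
    have := sum_filter_pow_lt (fun i => pyTestBit x (bits.getD i 0)) bits.length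
    simpa [gMask] using this
  have h0' : mask >>> bits.length = 0 := by
    rw [Nat.shiftRight_eq_div_pow]
    exact Nat.div_eq_of_lt (by rwa [Nat.one_shiftLeft] at hmask)
  simp [h0, h0']

-- ===== VERDICT (by name: the statement is the Claim_ definition above) =====
theorem countEffective_spec : Claim_equal_countEffective := by
  intro nums _
  unfold Spec_countEffective
  show countEffective nums = countEffective_alt nums
  simp only [countEffective, countEffective_alt]
  by_cases hT : (nums.foldl (fun t x => PySem.Int.bor t x) 0) = 0
  · rw [if_pos hT, if_pos hT]
  · rw [if_neg hT, if_neg hT]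
    set bits := (List.range 21).filter
      (fun i => pyTestBit (nums.foldl (fun t x => PySem.Int.bor t x) 0) i) with hbits
    set freqA := nums.foldl (fun (c : Array Int) x =>
        c.setIfInBounds ((List.range bits.length).foldl (fun nx i =>
            if pyTestBit x (bits.getD i 0) then nx ||| (1 <<< i) else nx) 0)
          (c.getD ((List.range bits.length).foldl (fun nx i =>
            if pyTestBit x (bits.getD i 0) then nx ||| (1 <<< i) else nx) 0) 0 + 1))
        (Array.replicate (1 <<< bits.length) (0 : Int)) with hfr
    set cntA := (List.range bits.length).foldl (fun (c : Array Int) i =>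
        (List.range (1 <<< bits.length)).foldl (fun (c : Array Int) mask =>
          if mask &&& (1 <<< i) ≠ 0 then c.setIfInBounds mask (c.getD mask 0 + c.getD (mask ^^^ (1 <<< i)) 0) else c) c)
        freqA with hcn
    set powA := (List.range' 1 nums.length).foldl (fun (p : Array Int) i =>
        p.setIfInBounds i (p.getD (i - 1) 0 * 2 % (1000000007 : Int)))
        (Array.replicate (nums.length + 1) (1 : Int)) with hpw
    set masksB := nums.map (fun x => gMask bits bits.length x) with hmk
    have hb : PySem.Int.powMod 2 nums.length 1000000007
        = ((2 : Int) ^ nums.length - 0) % 1000000007 := by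
      rw [PySem.Int.powMod_eq_emod _ _ (by norm_num), sub_zero]
    have ht : ∀ mask ∈ List.range (1 <<< bits.length),
        powA.getD ((cntA.getD mask 0).toNat) 0
          = PySem.Int.powMod 2 (masksB.countP (fun mx => mx ||| mask == mask)) 1000000007 := by
      intro mask hmem
      have hmask : mask < 1 <<< bits.length := List.mem_range.mp hmem
      have hcv := cnt_final bits nums mask hmask
      rw [hcn, hfr, hcv, Int.toNat_natCast, hpw,
        pow2_val nums.length _ (List.countP_le_length ..),
        PySem.Int.powMod_eq_emod _ _ (by norm_num), hmk, List.countP_map]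
      rfl
    have hp := pie_fold (List.range (1 <<< bits.length))
      (fun mask : Nat => ((bits.length : Int) - ((PySem.Int.bitCount (Int.ofNat mask) : Nat) : Int)) % 2 = 1)
      (fun mask => powA.getD ((cntA.getD mask 0).toNat) 0)
      (fun mask => PySem.Int.powMod 2 (masksB.countP (fun mx => mx ||| mask == mask)) 1000000007)
      ((2 : Int) ^ nums.length) 1000000007 ht 0
      (PySem.Int.powMod 2 nums.length 1000000007) hb
    refine Eq.trans ?_ hp.symm
    rw [hpw, pow2_val nums.length nums.length le_rfl, Int.emod_sub_emod]
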